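-- pv_equiv track=rewrite | github.com/F-Palmer/advent-of-code-25 | Day4/day_four_II.py | get_number_reachable
-- ===== SOURCE A (Python) =====
-- import copy
--
-- def is_center_tile_reachable(row: int, column: int, ware_house: list[list[str]]) -> bool:
--     paper_rolls = 0
--     for x in [-1,0, 1]:
--         for y in [-1,0, 1]:
--             if x == 0 and y == 0:
--                 continue
--             if ware_house[row + x][column + y] == "@":
--                 paper_rolls += 1
--     if paper_rolls > 3:
--         return False
--     return True
--
-- def get_number_reachable(ware_house: list[list[str]]) -> tuple[int, list[list[str]]]:
--     reachable = 0
--     copy_ware_house = copy.deepcopy(ware_house)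
--     for x in range(1, len(ware_house)-1):
--         for y in range(1, len(ware_house)-1):
--             if ware_house[x][y] == "@":
--                 if is_center_tile_reachable(x, y, ware_house):
--                     reachable += 1
--                     copy_ware_house[x][y] = "."
--     return reachable, copy_ware_house
-- ===== SOURCE B (Python) =====
-- def get_number_reachable(ware_house: list[list[str]]) -> tuple[int, list[list[str]]]:
--     n = len(ware_house)
--     copy_ware_house = [row[:] for row in ware_house]
--     # horizontal 3-window sums of '@' indicators, per row, for columns 1..n-2
--     # (missing cells of a short row count as 0, i.e. not '@')
--     h = []
--     for row in ware_house:
--         ind = [1 if j < len(row) and row[j] == "@" else 0 for j in range(n)]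
--         h.append([ind[j - 1] + ind[j] + ind[j + 1] for j in range(1, n - 1)])
--     reachable = 0
--     for x in range(1, n - 1):
--         above, mid, below = h[x - 1], h[x], h[x + 1]
--         row = ware_house[x]
--         for y in range(1, n - 1):
--             # 3x3 window sum <= 4  <=>  8-neighbor count <= 3 (center itself is '@')
--             if row[y] == "@" and above[y - 1] + mid[y - 1] + below[y - 1] <= 4:
--                 reachable += 1
--                 copy_ware_house[x][y] = "."
--     return reachable, copy_ware_house
-- ===== Notes on version B (the rewrite author's own statement) =====
-- stated objective: faster
-- what changed: Replaces the per-cell 8-neighbor probing helper with a separable convolution: one precomputed horizontal 3-window sum per row, so each interior cell's 3x3 window is three additions of cached row sums (threshold 4 = neighbors + center) instead of eight nested grid accesses through a function call.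
import Mathlib
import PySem

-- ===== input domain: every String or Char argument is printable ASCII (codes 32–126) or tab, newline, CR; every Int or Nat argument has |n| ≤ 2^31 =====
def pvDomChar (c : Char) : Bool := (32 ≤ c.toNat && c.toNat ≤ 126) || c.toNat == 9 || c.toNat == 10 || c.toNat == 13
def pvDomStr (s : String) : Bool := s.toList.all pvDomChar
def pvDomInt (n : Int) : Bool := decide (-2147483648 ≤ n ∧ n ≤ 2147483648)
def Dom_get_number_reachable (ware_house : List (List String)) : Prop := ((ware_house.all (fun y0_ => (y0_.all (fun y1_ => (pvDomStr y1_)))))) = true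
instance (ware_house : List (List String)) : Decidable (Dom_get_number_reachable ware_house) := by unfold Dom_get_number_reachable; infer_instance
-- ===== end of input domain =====

-- B replaces the per-cell 8-neighbor probing helper by precomputed horizontal 3-window row sums
-- (separable convolution), a constant-factor faster evaluation of the same count.


-- ===== PORT A =====
-- xs[i] ported as pyGetD (in-range on every access admitted by Pre_, where Python returns normally)
def is_center_tile_reachable (row : Int) (column : Int) (ware_house : List (List String)) : Bool :=
  let paper_rolls : Int :=
    ([-1, 0, 1] : List Int).foldl (fun pr x =>
      ([-1, 0, 1] : List Int).foldl (fun pr y =>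
        if x = 0 ∧ y = 0 then pr
        else if PySem.List.pyGetD (PySem.List.pyGetD ware_house (row + x) []) (column + y) "" = "@" then pr + 1
        else pr) pr) 0
  if paper_rolls > 3 then false else true

def get_number_reachable (ware_house : List (List String)) : Int × List (List String) :=
  -- copy.deepcopy = identity on immutable Lean values
  (PySem.List.pyRange 1 ((ware_house.length : Int) - 1) 1).foldl (fun st x =>
    (PySem.List.pyRange 1 ((ware_house.length : Int) - 1) 1).foldl (fun st y =>
      if PySem.List.pyGetD (PySem.List.pyGetD ware_house x []) y "" = "@" then
        if is_center_tile_reachable x y ware_house then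
          (st.1 + 1, PySem.List.pySetD st.2 x (PySem.List.pySetD (PySem.List.pyGetD st.2 x []) y "."))
        else st
      else st) st) ((0 : Int), ware_house)

-- ===== PORT B =====
-- '@' indicators of one row, columns 0..n-1 (cells beyond a short row count as 0)
def pvIndRow (n : Int) (row : List String) : List Int :=
  (PySem.List.pyRange 0 n 1).map (fun j =>
    if j < (row.length : Int) ∧ PySem.List.pyGetD row j "" = "@" then 1 else 0)

-- horizontal 3-window sums of one row, for columns 1..n-2
def pvHRow (n : Int) (row : List String) : List Int :=
  let ind := pvIndRow n row
  (PySem.List.pyRange 1 (n - 1) 1).map (fun j =>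
    PySem.List.pyGetD ind (j - 1) 0 + PySem.List.pyGetD ind j 0 + PySem.List.pyGetD ind (j + 1) 0)

def get_number_reachable_alt (ware_house : List (List String)) : Int × List (List String) :=
  let n : Int := ware_house.length
  let h := ware_house.map (pvHRow n)
  (PySem.List.pyRange 1 (n - 1) 1).foldl (fun st x =>
    let above := PySem.List.pyGetD h (x - 1) []
    let mid := PySem.List.pyGetD h x []
    let below := PySem.List.pyGetD h (x + 1) []
    let row := PySem.List.pyGetD ware_house x []
    (PySem.List.pyRange 1 (n - 1) 1).foldl (fun st y =>
      if PySem.List.pyGetD row y "" = "@" ∧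
         PySem.List.pyGetD above (y - 1) 0 + PySem.List.pyGetD mid (y - 1) 0 + PySem.List.pyGetD below (y - 1) 0 ≤ 4 then
        (st.1 + 1, PySem.List.pySetD st.2 x (PySem.List.pySetD (PySem.List.pyGetD st.2 x []) y "."))
      else st) st) ((0 : Int), ware_house)

-- ===== PRECONDITION & SPEC =====
-- Exactly the inputs on which Python A returns normally: every index A actually reads is in
-- range — each interior row is long enough for the scan, and around every scanned '@' the
-- three adjacent rows reach the neighbouring column (elsewhere A raises IndexError).
def Pre_get_number_reachable (ware_house : List (List String)) : Prop :=
  ∀ x ∈ List.range ware_house.length, ∀ y ∈ List.range ware_house.length,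
    1 ≤ x → x + 1 < ware_house.length → 1 ≤ y → y + 1 < ware_house.length →
      (ware_house.length - 1 ≤ (ware_house.getD x []).length ∧
       ((ware_house.getD x []).getD y "" = "@" →
         y + 2 ≤ (ware_house.getD (x - 1) []).length ∧
         y + 2 ≤ (ware_house.getD x []).length ∧
         y + 2 ≤ (ware_house.getD (x + 1) []).length))
instance (ware_house : List (List String)) : Decidable (Pre_get_number_reachable ware_house) := by unfold Pre_get_number_reachable; infer_instance

def pvWitness_get_number_reachable : List (List String) :=
  [[".", "@", "."], ["@", "@", "@"], [".", "@", "."]]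

def Spec_get_number_reachable (ware_house : List (List String)) (out : Int × List (List String)) : Prop := out = get_number_reachable_alt ware_house
instance (ware_house : List (List String)) (out : Int × List (List String)) : Decidable (Spec_get_number_reachable ware_house out) := by unfold Spec_get_number_reachable; infer_instance

-- ===== CLAIM (what is proved, stated in full; the proofs are below) =====
def Claim_equal_get_number_reachable : Prop := ∀ (ware_house : List (List String)), Dom_get_number_reachable ware_house → Pre_get_number_reachable ware_house → Spec_get_number_reachable ware_house (get_number_reachable ware_house)

-- ===== LEMMAS AND PROOFS =====

-- '@' indicator of cell (i, j), the quantity both programs count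
def pvCC (ware_house : List (List String)) (i j : Int) : Int :=
  if PySem.List.pyGetD (PySem.List.pyGetD ware_house i []) j "" = "@" then 1 else 0

-- the short-row guard in pvIndRow is invisible at nonnegative indices: out of range, xs[j] defaults to "" ≠ "@"
theorem pvInd_eq (row : List String) (j : Int) :
    (if j < (row.length : Int) ∧ PySem.List.pyGetD row j "" = "@" then (1 : Int) else 0)
      = if PySem.List.pyGetD row j "" = "@" then 1 else 0 := by
  by_cases hin : j < (row.length : Int)
  · simp [hin]
  · have hnone : PySem.List.pyGet? row j = none := by
      rw [PySem.List.pyGet?_eq_none_iff]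
      simp only [PySem.Raise.InRange]
      omega
    have hd : PySem.List.pyGetD row j "" = "" := by
      simp [PySem.List.pyGetD, hnone]
    simp [hin, hd]

theorem pvWindow_get (wh : List (List String)) (i y : Int)
    (h0 : 0 ≤ i) (h1 : i < (wh.length : Int))
    (hy1 : 1 ≤ y) (hy2 : y < (wh.length : Int) - 1) :
    PySem.List.pyGetD (PySem.List.pyGetD (wh.map (pvHRow (wh.length : Int))) (i) []) (y - 1) 0
      = pvCC wh i (y - 1) + pvCC wh i y + pvCC wh i (y + 1) := by
  have hlen : (wh.map (pvHRow (wh.length : Int))).length = wh.length := by simp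
  rw [PySem.List.pyGetD_eq_getElem _ _ h0 (by rw [hlen]; exact h1), List.getElem_map]
  have hrow : PySem.List.pyGetD wh i [] = wh[i.toNat] :=
    PySem.List.pyGetD_eq_getElem _ _ h0 h1
  simp only [pvCC, hrow, pvHRow, pvIndRow]
  have hk : y - 1 = (((y - 1).toNat : Nat) : Int) := by omega
  rw [hk, PySem.List.pyGetD_map_pyRange_one _ 1 ((wh.length : Int) - 1) _ 0 (by omega)]
  have h1' : (1 : Int) + ((y - 1).toNat : Int) = y := by omega
  rw [h1']
  rw [PySem.List.pyGetD_map_pyRange_of_nonneg _ _ (y - 1) 0 (by omega) (by omega),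
      PySem.List.pyGetD_map_pyRange_of_nonneg _ _ y 0 (by omega) (by omega),
      PySem.List.pyGetD_map_pyRange_of_nonneg _ _ (y + 1) 0 (by omega) (by omega), ← hk,
      pvInd_eq _ (y - 1), pvInd_eq _ y, pvInd_eq _ (y + 1)]

theorem pvIsCenter (r q : Int) (wh : List (List String)) :
    is_center_tile_reachable r q wh
      = decide (pvCC wh (r - 1) (q - 1) + pvCC wh (r - 1) q + pvCC wh (r - 1) (q + 1)
        + pvCC wh r (q - 1) + pvCC wh r (q + 1)
        + pvCC wh (r + 1) (q - 1) + pvCC wh (r + 1) q + pvCC wh (r + 1) (q + 1) ≤ 3) := by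
  have hbody : ∀ (x pr : Int),
      ([-1, 0, 1] : List Int).foldl (fun pr y =>
        if x = 0 ∧ y = 0 then pr
        else if PySem.List.pyGetD (PySem.List.pyGetD wh (r + x) []) (q + y) "" = "@" then pr + 1
        else pr) pr
      = pr + (([-1, 0, 1] : List Int).map (fun y =>
          if x = 0 ∧ y = 0 then 0
          else if PySem.List.pyGetD (PySem.List.pyGetD wh (r + x) []) (q + y) "" = "@" then 1 else 0)).sum := by
    intro x pr
    rw [← PySem.List.foldl_add]
    exact PySem.List.foldl_congr_mem _ _ _ _ (fun acc yy _ => by split_ifs <;> omega)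
  unfold is_center_tile_reachable
  rw [show ∀ z : Int, (if z > 3 then false else true) = decide (z ≤ 3) from
        fun z => by split_ifs with h <;> simp <;> omega]
  congr 1
  rw [PySem.List.foldl_congr_mem _ _
        (fun pr x => pr + (([-1, 0, 1] : List Int).map (fun y =>
          if x = 0 ∧ y = 0 then 0
          else if PySem.List.pyGetD (PySem.List.pyGetD wh (r + x) []) (q + y) "" = "@" then 1 else 0)).sum) _
        (fun acc xx _ => hbody xx acc)]
  rw [PySem.List.foldl_add]
  simp only [List.map_cons, List.map_nil, List.sum_cons, List.sum_nil, pvCC]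
  norm_num [← sub_eq_add_neg]
  split_ifs <;> omega

theorem pvCond_eq (wh : List (List String)) (x y : Int)
    (hx1 : 1 ≤ x) (hx2 : x < (wh.length : Int) - 1)
    (hy1 : 1 ≤ y) (hy2 : y < (wh.length : Int) - 1) :
    (PySem.List.pyGetD (PySem.List.pyGetD wh x []) y "" = "@" ∧ is_center_tile_reachable x y wh = true)
    ↔ (PySem.List.pyGetD (PySem.List.pyGetD wh x []) y "" = "@" ∧
        PySem.List.pyGetD (PySem.List.pyGetD (wh.map (pvHRow (wh.length : Int))) (x - 1) []) (y - 1) 0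
        + PySem.List.pyGetD (PySem.List.pyGetD (wh.map (pvHRow (wh.length : Int))) x []) (y - 1) 0
        + PySem.List.pyGetD (PySem.List.pyGetD (wh.map (pvHRow (wh.length : Int))) (x + 1) []) (y - 1) 0 ≤ 4) := by
  rw [pvWindow_get wh (x - 1) y (by omega) (by omega) hy1 hy2,
      pvWindow_get wh x y (by omega) (by omega) hy1 hy2,
      pvWindow_get wh (x + 1) y (by omega) (by omega) hy1 hy2]
  apply and_congr_right
  intro hc
  rw [pvIsCenter]
  simp only [decide_eq_true_eq]
  have hcenter : pvCC wh x y = 1 := by simp [pvCC, hc]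
  omega

-- ===== VERDICT (by name: the statement is the Claim_ definition above) =====
theorem get_number_reachable_spec : Claim_equal_get_number_reachable := by
  intro wh _ _
  simp only [Spec_get_number_reachable, get_number_reachable, get_number_reachable_alt]
  apply PySem.List.foldl_congr_mem
  intro st x hx
  apply PySem.List.foldl_congr_mem
  intro st' y hy
  rw [PySem.List.mem_pyRange_one] at hx hy
  by_cases hc : PySem.List.pyGetD (PySem.List.pyGetD wh x []) y "" = "@"
  · by_cases hr : is_center_tile_reachable x y wh = true
    · have hw := ((pvCond_eq wh x y hx.1 hx.2 hy.1 hy.2).mp ⟨hc, hr⟩).2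
      simp [hc, hr, hw]
    · have hw : ¬ (PySem.List.pyGetD (PySem.List.pyGetD (wh.map (pvHRow (wh.length : Int))) (x - 1) []) (y - 1) 0
          + PySem.List.pyGetD (PySem.List.pyGetD (wh.map (pvHRow (wh.length : Int))) x []) (y - 1) 0
          + PySem.List.pyGetD (PySem.List.pyGetD (wh.map (pvHRow (wh.length : Int))) (x + 1) []) (y - 1) 0 ≤ 4) :=
        fun h => hr ((pvCond_eq wh x y hx.1 hx.2 hy.1 hy.2).mpr ⟨hc, h⟩).2
      simp [hc, hr, hw]
  · simp [hc]
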